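-- pv_equiv track=rewrite | github.com/bizarrebeam/DDP-1-Archive | tugas_pemrograman/tp_2/archive_struggle_tp2/mencari.py | extract_attributes_content
-- ===== SOURCE A (Python) =====
-- def extract_attributes_content(lines):
--     try: # Attempt to parse the attributes
--         for line in lines:
--             if "<putusan" in line: # Get the content within the putusan tag
--                 words = line.split()
--
--                 for word in words:
--                     if word.startswith("id="):
--                         xml_filename = word.split('"')[1].rjust(40)
--                     elif word.startswith("provinsi="):
--                         provinsi = word.split('"')[1].rjust(15)
--                     elif word.startswith('klasifikasi="'):
--                         klasifikasi = word.split('"')[1].rjust(15)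
--                     elif word.startswith('sub_klasifikasi="'):
--                         sub_klasifikasi = word.split('"')[1].rjust(30)
--                     elif word.startswith('lembaga_peradilan="'):
--                         lembaga_peradilan = word.split('"')[1].rjust(20)
--
--         return xml_filename, provinsi, klasifikasi, sub_klasifikasi, lembaga_peradilan
--
--     except Exception: # Handle the trouble in parsing tag
--         return None, None, None, None, None
-- ===== SOURCE B (Python) =====
-- # Staged rewrite: flatten the words of all <putusan lines once, then resolve each
-- # attribute independently by filtering its matching words and taking the last one.
-- FIELDS = (("id=", 40), ("provinsi=", 15), ('klasifikasi="', 15),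
--           ('sub_klasifikasi="', 30), ('lembaga_peradilan="', 20))
--
-- def extract_attributes_content(lines):
--     words = [w for line in lines if "<putusan" in line for w in line.split()]
--     out = []
--     for prefix, width in FIELDS:
--         matches = [w.split('"') for w in words if w.startswith(prefix)]
--         if not matches or any(len(parts) < 2 for parts in matches):
--             return None, None, None, None, None
--         out.append(matches[-1][1].rjust(width))
--     return tuple(out)
-- ===== Notes on version B (the rewrite author's own statement) =====
-- stated objective: alternative
-- what changed: Replaces A's single stateful pass (five locals updated by an if/elif dispatch per word) by staged passes: first flatten all words of <putusan lines into one list, then resolve each of the five attributes independently by filtering its matching words and taking the last match, with an explicit validity check replacing the exception path.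
import Mathlib
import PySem

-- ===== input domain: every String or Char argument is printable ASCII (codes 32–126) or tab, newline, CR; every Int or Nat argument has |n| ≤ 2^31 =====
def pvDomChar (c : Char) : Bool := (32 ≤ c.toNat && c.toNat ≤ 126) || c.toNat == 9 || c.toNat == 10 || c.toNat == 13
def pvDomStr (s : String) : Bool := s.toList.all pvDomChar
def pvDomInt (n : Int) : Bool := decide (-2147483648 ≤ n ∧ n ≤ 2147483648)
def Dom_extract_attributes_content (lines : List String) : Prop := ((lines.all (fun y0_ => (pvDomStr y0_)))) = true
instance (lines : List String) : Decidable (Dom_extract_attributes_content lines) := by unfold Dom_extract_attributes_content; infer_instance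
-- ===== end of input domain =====

-- B replaces A's single stateful pass (five locals updated by an if/elif dispatch per word)
-- by staged passes: flatten the words of all <putusan lines once, then resolve each attribute
-- independently by filtering its matches and taking the last one (objective: alternative).

-- ===== PORT A =====
-- word.split('"')[1]  (none = IndexError; split? is some since the separator is nonempty)
def pvQuoted (word : String) : Option String :=
  ((PySem.Str.split? word "\"").getD [])[1]?

-- s.rjust(w): left-pad with spaces to width w (no-op if already at least w long); exact for ASCII
def pvRjust (s : String) (w : Nat) : String :=
  String.ofList (List.replicate (w - s.toList.length) ' ' ++ s.toList)

-- the five-variable state of A's loop (NameError ↔ a component still none at the end)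
def pvStepA (s : Option String × Option String × Option String × Option String × Option String)
    (word : String) :
    Option (Option String × Option String × Option String × Option String × Option String) :=
  if PySem.Str.startswith word "id=" then
    (pvQuoted word).map fun v => (some (pvRjust v 40), s.2)
  else if PySem.Str.startswith word "provinsi=" then
    (pvQuoted word).map fun v => (s.1, some (pvRjust v 15), s.2.2)
  else if PySem.Str.startswith word "klasifikasi=\"" then
    (pvQuoted word).map fun v => (s.1, s.2.1, some (pvRjust v 15), s.2.2.2)
  else if PySem.Str.startswith word "sub_klasifikasi=\"" then
    (pvQuoted word).map fun v => (s.1, s.2.1, s.2.2.1, some (pvRjust v 30), s.2.2.2.2)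
  else if PySem.Str.startswith word "lembaga_peradilan=\"" then
    (pvQuoted word).map fun v => (s.1, s.2.1, s.2.2.1, s.2.2.2.1, some (pvRjust v 20))
  else some s

def pvLineA (s : Option String × Option String × Option String × Option String × Option String)
    (line : String) :
    Option (Option String × Option String × Option String × Option String × Option String) :=
  if PySem.Str.isIn "<putusan" line then
    (PySem.Str.split₀ line).foldl (fun os w => os.bind (fun s' => pvStepA s' w)) (some s)
  else some s

def extract_attributes_content (lines : List String) :
    Option String × Option String × Option String × Option String × Option String :=
  match lines.foldl (fun os l => os.bind (fun s => pvLineA s l))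
      (some (none, none, none, none, none)) with
  | some (some a, some b, some c, some d, some e) => (some a, some b, some c, some d, some e)
  | _ => (none, none, none, none, none)

-- ===== PORT B =====
-- B's own word.split('"') and s.rjust(w) (the same Python expressions occur in Source B)
def pvPartsB (word : String) : List String := (PySem.Str.split? word "\"").getD []

def pvRjustB (s : String) (w : Nat) : String :=
  String.ofList (List.replicate (w - s.toList.length) ' ' ++ s.toList)

def pvFieldsB : List (String × Nat) :=
  [("id=", 40), ("provinsi=", 15), ("klasifikasi=\"", 15),
   ("sub_klasifikasi=\"", 30), ("lembaga_peradilan=\"", 20)]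

-- the body of Source B's per-field loop iteration: filter matches, validity check, last match
def pvFieldB (words : List String) (p : String) (wd : Nat) : Option String :=
  let ms := (words.filter (fun w => PySem.Str.startswith w p)).map pvPartsB
  if ms.isEmpty || ms.any (fun parts => decide (parts.length < 2)) then none
  else (ms.getLast?.bind (fun parts => parts[1]?)).map (fun v => pvRjustB v wd)

-- Source B's 'for prefix, width in FIELDS' loop with its early return (none) and out-accumulator
def pvLoopB (words : List String) : List (String × Nat) → Option (List String)
  | [] => some []
  | (p, wd) :: rest =>
    match pvFieldB words p wd with
    | none => none
    | some v => (pvLoopB words rest).map (fun out => v :: out)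

def extract_attributes_content_alt (lines : List String) :
    Option String × Option String × Option String × Option String × Option String :=
  let words := (lines.filter (fun l => PySem.Str.isIn "<putusan" l)).flatMap PySem.Str.split₀
  match pvLoopB words pvFieldsB with
  | none => (none, none, none, none, none)
  | some out =>
    match out with
    | [a, b, c, d, e] => (some a, some b, some c, some d, some e)
    | _ => (none, none, none, none, none)

-- ===== PRECONDITION & SPEC =====
def Spec_extract_attributes_content (lines : List String) (out : Option String × Option String × Option String × Option String × Option String) : Prop := out = extract_attributes_content_alt lines
instance (lines : List String) (out : Option String × Option String × Option String × Option String × Option String) : Decidable (Spec_extract_attributes_content lines out) := by unfold Spec_extract_attributes_content; infer_instance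

-- ===== CLAIM (what is proved, stated in full; the proofs are below) =====
def Claim_equal_extract_attributes_content : Prop := ∀ (lines : List String), Dom_extract_attributes_content lines → Spec_extract_attributes_content lines (extract_attributes_content lines)

-- ===== LEMMAS AND PROOFS =====

-- none is absorbing for the option-state folds
theorem pv_foldl_bind_none {α β : Type} (f : α → β → Option α) (ws : List β) :
    ws.foldl (fun o w => o.bind (fun s => f s w)) none = none := by
  induction ws with
  | nil => rfl
  | cons w ws ih => simpa using ih

theorem pv_foldl_bind_eq {α β : Type} (f : α → β → Option α) (ws : List β) (os : Option α) :
    ws.foldl (fun o w => o.bind (fun s => f s w)) os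
      = os.bind (fun s => ws.foldl (fun o w => o.bind (fun s' => f s' w)) (some s)) := by
  cases os with
  | none => simp [pv_foldl_bind_none]
  | some s => rfl

-- A's fold over lines is the fold of pvStepA over the flattened words of the <putusan lines
theorem pv_lines_to_words (lines : List String)
    (os : Option (Option String × Option String × Option String × Option String × Option String)) :
    lines.foldl (fun o l => o.bind (fun s => pvLineA s l)) os
      = ((lines.filter (fun l => PySem.Str.isIn "<putusan" l)).flatMap PySem.Str.split₀).foldl
          (fun o w => o.bind (fun s => pvStepA s w)) os := by
  induction lines generalizing os with
  | nil => rfl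
  | cons l ls ih =>
    by_cases h : PySem.Str.isIn "<putusan" l = true
    · have hb : os.bind (fun s => pvLineA s l)
          = (PySem.Str.split₀ l).foldl (fun o w => o.bind (fun s' => pvStepA s' w)) os := by
        have : (fun s => pvLineA s l) = (fun s =>
            (PySem.Str.split₀ l).foldl (fun o w => o.bind (fun s' => pvStepA s' w)) (some s)) := by
          funext s
          unfold pvLineA
          rw [if_pos h]
        rw [this, ← pv_foldl_bind_eq]
      simp only [List.foldl_cons, List.filter_cons, h, if_pos, List.flatMap_cons,
        List.foldl_append, hb]
      exact ih _
    · have hb : os.bind (fun s => pvLineA s l) = os := by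
        have : (fun s => pvLineA s l)
            = (fun s : Option String × Option String × Option String × Option String ×
                Option String => some s) := by
          funext s
          unfold pvLineA
          rw [if_neg h]
        rw [this]; cases os <;> rfl
      simp only [List.foldl_cons, List.filter_cons, h, hb]
      exact ih os

-- two of the five attribute prefixes never both match one word (none is a prefix of another)
theorem pv_excl {w p q : String}
    (hpq : ¬ (p.toList <+: q.toList) ∧ ¬ (q.toList <+: p.toList))
    (hp : PySem.Str.startswith w p = true) : PySem.Str.startswith w q = false := by
  by_contra h
  have hq : PySem.Str.startswith w q = true := by
    cases hh : PySem.Str.startswith w q with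
    | true => rfl
    | false => exact absurd hh h
  rw [PySem.Str.startswith_eq, PySem.Chars.startswith_iff] at hp hq
  rcases List.prefix_or_prefix_of_prefix hp hq with h1 | h1
  · exact hpq.1 h1
  · exact hpq.2 h1

-- word matches some attribute prefix
def pvMatched (w : String) : Bool :=
  PySem.Str.startswith w "id=" || PySem.Str.startswith w "provinsi=" ||
  PySem.Str.startswith w "klasifikasi=\"" || PySem.Str.startswith w "sub_klasifikasi=\"" ||
  PySem.Str.startswith w "lembaga_peradilan=\""

-- last-wins value of one attribute over a word list, starting from c
def pvComp (p : String) (wd : Nat) (c : Option String) (ws : List String) : Option String :=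
  ws.foldl (fun acc w =>
    if PySem.Str.startswith w p then (pvQuoted w).map (fun v => pvRjust v wd) else acc) c

-- characterization of A's word fold: none iff some matching word has no quoted part,
-- otherwise each component is the last-wins value of its attribute
theorem pv_charA (ws : List String)
    (s : Option String × Option String × Option String × Option String × Option String) :
    ws.foldl (fun os w => os.bind (fun s' => pvStepA s' w)) (some s)
      = if ws.any (fun w => pvMatched w && (pvQuoted w).isNone) then none
        else some (pvComp "id=" 40 s.1 ws, pvComp "provinsi=" 15 s.2.1 ws,
          pvComp "klasifikasi=\"" 15 s.2.2.1 ws, pvComp "sub_klasifikasi=\"" 30 s.2.2.2.1 ws,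
          pvComp "lembaga_peradilan=\"" 20 s.2.2.2.2 ws) := by
  induction ws generalizing s with
  | nil => simp [pvComp]
  | cons w ws ih =>
    by_cases h1 : PySem.Str.startswith w "id=" = true
    · have e2 := pv_excl (p := "id=") (q := "provinsi=") (by decide) h1
      have e3 := pv_excl (p := "id=") (q := "klasifikasi=\"") (by decide) h1
      have e4 := pv_excl (p := "id=") (q := "sub_klasifikasi=\"") (by decide) h1
      have e5 := pv_excl (p := "id=") (q := "lembaga_peradilan=\"") (by decide) h1
      simp [PySem.Str.startswith_eq] at h1 e2 e3 e4 e5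
      cases hq : pvQuoted w with
      | none =>
        simp only [List.foldl_cons, Option.bind_some]
        rw [show pvStepA s w = none by simp [pvStepA, h1, hq]]
        rw [pv_foldl_bind_none]
        simp [pvMatched, h1, hq]
      | some v =>
        simp only [List.foldl_cons, Option.bind_some]
        rw [show pvStepA s w = some (some (pvRjust v 40), s.2) by simp [pvStepA, h1, hq]]
        rw [ih]
        simp [pvMatched, h1, e2, e3, e4, e5, hq, pvComp]
    · by_cases h2 : PySem.Str.startswith w "provinsi=" = true
      · have e1 := pv_excl (p := "provinsi=") (q := "id=") (by decide) h2
        have e3 := pv_excl (p := "provinsi=") (q := "klasifikasi=\"") (by decide) h2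
        have e4 := pv_excl (p := "provinsi=") (q := "sub_klasifikasi=\"") (by decide) h2
        have e5 := pv_excl (p := "provinsi=") (q := "lembaga_peradilan=\"") (by decide) h2
        simp [PySem.Str.startswith_eq] at h1 h2 e1 e3 e4 e5
        cases hq : pvQuoted w with
        | none =>
          simp only [List.foldl_cons, Option.bind_some]
          rw [show pvStepA s w = none by simp [pvStepA, h1, h2, hq]]
          rw [pv_foldl_bind_none]
          simp [pvMatched, h2, hq]
        | some v =>
          simp only [List.foldl_cons, Option.bind_some]
          rw [show pvStepA s w = some (s.1, some (pvRjust v 15), s.2.2) by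
            simp [pvStepA, h1, h2, hq]]
          rw [ih]
          simp [pvMatched, h2, e1, e3, e4, e5, hq, pvComp]
      · by_cases h3 : PySem.Str.startswith w "klasifikasi=\"" = true
        · have e1 := pv_excl (p := "klasifikasi=\"") (q := "id=") (by decide) h3
          have e2 := pv_excl (p := "klasifikasi=\"") (q := "provinsi=") (by decide) h3
          have e4 := pv_excl (p := "klasifikasi=\"") (q := "sub_klasifikasi=\"") (by decide) h3
          have e5 := pv_excl (p := "klasifikasi=\"") (q := "lembaga_peradilan=\"") (by decide) h3
          simp [PySem.Str.startswith_eq] at h1 h2 h3 e1 e2 e4 e5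
          cases hq : pvQuoted w with
          | none =>
            simp only [List.foldl_cons, Option.bind_some]
            rw [show pvStepA s w = none by simp [pvStepA, h1, h2, h3, hq]]
            rw [pv_foldl_bind_none]
            simp [pvMatched, h3, hq]
          | some v =>
            simp only [List.foldl_cons, Option.bind_some]
            rw [show pvStepA s w = some (s.1, s.2.1, some (pvRjust v 15), s.2.2.2) by
              simp [pvStepA, h1, h2, h3, hq]]
            rw [ih]
            simp [pvMatched, h3, e1, e2, e4, e5, hq, pvComp]
        · by_cases h4 : PySem.Str.startswith w "sub_klasifikasi=\"" = true
          · have e1 := pv_excl (p := "sub_klasifikasi=\"") (q := "id=") (by decide) h4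
            have e2 := pv_excl (p := "sub_klasifikasi=\"") (q := "provinsi=") (by decide) h4
            have e3 := pv_excl (p := "sub_klasifikasi=\"") (q := "klasifikasi=\"") (by decide) h4
            have e5 := pv_excl (p := "sub_klasifikasi=\"") (q := "lembaga_peradilan=\"") (by decide) h4
            simp [PySem.Str.startswith_eq] at h1 h2 h3 h4 e1 e2 e3 e5
            cases hq : pvQuoted w with
            | none =>
              simp only [List.foldl_cons, Option.bind_some]
              rw [show pvStepA s w = none by simp [pvStepA, h1, h2, h3, h4, hq]]
              rw [pv_foldl_bind_none]
              simp [pvMatched, h4, hq]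
            | some v =>
              simp only [List.foldl_cons, Option.bind_some]
              rw [show pvStepA s w = some (s.1, s.2.1, s.2.2.1, some (pvRjust v 30), s.2.2.2.2) by
                simp [pvStepA, h1, h2, h3, h4, hq]]
              rw [ih]
              simp [pvMatched, h4, e1, e2, e3, e5, hq, pvComp]
          · by_cases h5 : PySem.Str.startswith w "lembaga_peradilan=\"" = true
            · have e1 := pv_excl (p := "lembaga_peradilan=\"") (q := "id=") (by decide) h5
              have e2 := pv_excl (p := "lembaga_peradilan=\"") (q := "provinsi=") (by decide) h5
              have e3 := pv_excl (p := "lembaga_peradilan=\"") (q := "klasifikasi=\"") (by decide) h5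
              have e4 := pv_excl (p := "lembaga_peradilan=\"") (q := "sub_klasifikasi=\"") (by decide) h5
              simp [PySem.Str.startswith_eq] at h1 h2 h3 h4 h5 e1 e2 e3 e4
              cases hq : pvQuoted w with
              | none =>
                simp only [List.foldl_cons, Option.bind_some]
                rw [show pvStepA s w = none by simp [pvStepA, h1, h2, h3, h4, h5, hq]]
                rw [pv_foldl_bind_none]
                simp [pvMatched, h5, hq]
              | some v =>
                simp only [List.foldl_cons, Option.bind_some]
                rw [show pvStepA s w = some (s.1, s.2.1, s.2.2.1, s.2.2.2.1, some (pvRjust v 20)) by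
                  simp [pvStepA, h1, h2, h3, h4, h5, hq]]
                rw [ih]
                simp [pvMatched, h5, e1, e2, e3, e4, hq, pvComp]
            · simp [PySem.Str.startswith_eq] at h1 h2 h3 h4 h5
              simp only [List.foldl_cons, Option.bind_some]
              rw [show pvStepA s w = some s by simp [pvStepA, h1, h2, h3, h4, h5]]
              rw [ih]
              simp [pvMatched, h1, h2, h3, h4, h5, pvComp]

-- (a :: l).getLast? in terms of l.getLast?
theorem pv_getLast?_cons {α : Type} (a : α) (l : List α) :
    (a :: l).getLast? = l.getLast?.or (some a) := by
  cases l with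
  | nil => rfl
  | cons b t =>
    rw [List.getLast?_cons_cons]
    cases h : (b :: t).getLast? with
    | none => exact absurd (List.getLast?_eq_none_iff.mp h) (by simp)
    | some x => rfl

-- last-wins fold = last element of the filtered list
theorem pv_comp_lastwins (p : String) (wd : Nat) (ws : List String) (c : Option String) :
    pvComp p wd c ws
      = match (ws.filter (fun w => PySem.Str.startswith w p)).getLast? with
        | none => c
        | some w => (pvQuoted w).map (fun v => pvRjust v wd) := by
  induction ws generalizing c with
  | nil => rfl
  | cons w ws ih =>
    by_cases h : PySem.Str.startswith w p = true
    · rw [show List.filter (fun w' => PySem.Str.startswith w' p) (w :: ws)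
          = w :: List.filter (fun w' => PySem.Str.startswith w' p) ws from
          List.filter_cons_of_pos h, pv_getLast?_cons]
      have hstep : pvComp p wd c (w :: ws)
          = pvComp p wd ((pvQuoted w).map (fun v => pvRjust v wd)) ws := by
        simp only [pvComp, List.foldl_cons]
        rw [if_pos h]
      rw [hstep, ih]
      cases (ws.filter (fun w' => PySem.Str.startswith w' p)).getLast? with
      | none => rfl
      | some x => rfl
    · rw [show List.filter (fun w' => PySem.Str.startswith w' p) (w :: ws)
          = List.filter (fun w' => PySem.Str.startswith w' p) ws from
          List.filter_cons_of_neg h]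
      have hstep : pvComp p wd c (w :: ws) = pvComp p wd c ws := by
        simp only [pvComp, List.foldl_cons]
        rw [if_neg h]
      rw [hstep]
      exact ih c

-- Source B's per-field computation characterized by the same bad-word test and last-wins value
theorem pv_fieldB_char (ws : List String) (p : String) (wd : Nat) :
    pvFieldB ws p wd
      = if ws.any (fun w => PySem.Str.startswith w p && (pvQuoted w).isNone) then none
        else pvComp p wd none ws := by
  have hparts : ∀ w : String, (pvQuoted w).isNone = decide ((pvPartsB w).length < 2) := by
    intro w
    unfold pvQuoted pvPartsB
    cases h : ((PySem.Str.split? w "\"").getD [])[1]? with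
    | none =>
      have hle := List.getElem?_eq_none_iff.mp h
      have hlt : ((PySem.Str.split? w "\"").getD []).length < 2 := by omega
      simp [hlt]
    | some v =>
      have hgt : 1 < ((PySem.Str.split? w "\"").getD []).length := by
        by_contra hc
        rw [List.getElem?_eq_none_iff.mpr (by omega)] at h
        exact absurd h (by simp)
      have hnlt : ¬ ((PySem.Str.split? w "\"").getD []).length < 2 := by omega
      simp [hnlt]
  have hdef : pvFieldB ws p wd
      = (if ((ws.filter (fun w => PySem.Str.startswith w p)).map pvPartsB).isEmpty
            || ((ws.filter (fun w => PySem.Str.startswith w p)).map pvPartsB).any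
                 (fun parts => decide (parts.length < 2)) then none
         else ((((ws.filter (fun w => PySem.Str.startswith w p)).map pvPartsB).getLast?.bind
             (fun parts => parts[1]?)).map (fun v => pvRjustB v wd))) := rfl
  rw [hdef]
  have hany : ((ws.filter (fun w => PySem.Str.startswith w p)).map pvPartsB).any
      (fun parts => decide (parts.length < 2))
      = ws.any (fun w => PySem.Str.startswith w p && (pvQuoted w).isNone) := by
    rw [List.any_map, List.any_filter]
    congr 1
    funext w
    rw [hparts w]
    rfl
  rw [hany]
  by_cases hbad : ws.any (fun w => PySem.Str.startswith w p && (pvQuoted w).isNone) = true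
  · rw [if_pos (by rw [hbad]; simp), if_pos hbad]
  · have hb := Bool.eq_false_iff.mpr hbad
    rw [if_neg hbad, hb, pv_comp_lastwins]
    simp only [Bool.or_false]
    by_cases he : (ws.filter (fun w => PySem.Str.startswith w p)) = []
    · rw [he]
      rfl
    · obtain ⟨x, hx⟩ : ∃ x, (ws.filter (fun w => PySem.Str.startswith w p)).getLast? = some x :=
        Option.ne_none_iff_exists'.mp (by simpa [List.getLast?_eq_none_iff] using he)
      rw [if_neg (by simp only [List.isEmpty_iff, List.map_eq_nil_iff]; exact he), List.getLast?_map, hx]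
      rfl

-- the global bad-word test splits into the five per-prefix tests
theorem pv_any_split (ws : List String) :
    ws.any (fun w => pvMatched w && (pvQuoted w).isNone)
      = (ws.any (fun w => PySem.Str.startswith w "id=" && (pvQuoted w).isNone) ||
         ws.any (fun w => PySem.Str.startswith w "provinsi=" && (pvQuoted w).isNone) ||
         ws.any (fun w => PySem.Str.startswith w "klasifikasi=\"" && (pvQuoted w).isNone) ||
         ws.any (fun w => PySem.Str.startswith w "sub_klasifikasi=\"" && (pvQuoted w).isNone) ||
         ws.any (fun w => PySem.Str.startswith w "lembaga_peradilan=\"" && (pvQuoted w).isNone)) := by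
  induction ws with
  | nil => rfl
  | cons w ws ih =>
    simp only [List.any_cons]
    rw [ih]
    simp only [pvMatched]
    cases PySem.Str.startswith w "id=" <;>
      cases PySem.Str.startswith w "provinsi=" <;>
      cases PySem.Str.startswith w "klasifikasi=\"" <;>
      cases PySem.Str.startswith w "sub_klasifikasi=\"" <;>
      cases PySem.Str.startswith w "lembaga_peradilan=\"" <;>
      cases (pvQuoted w).isNone <;>
      cases ws.any (fun w => PySem.Str.startswith w "id=" && (pvQuoted w).isNone) <;>
      cases ws.any (fun w => PySem.Str.startswith w "provinsi=" && (pvQuoted w).isNone) <;>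
      cases ws.any (fun w => PySem.Str.startswith w "klasifikasi=\"" && (pvQuoted w).isNone) <;>
      cases ws.any (fun w => PySem.Str.startswith w "sub_klasifikasi=\"" && (pvQuoted w).isNone) <;>
      cases ws.any (fun w => PySem.Str.startswith w "lembaga_peradilan=\"" && (pvQuoted w).isNone) <;>
      rfl

-- the whole equivalence, over an arbitrary word list
theorem pv_main_ws (ws : List String) :
    (match ws.foldl (fun os w => os.bind (fun s => pvStepA s w))
        (some (none, none, none, none, none)) with
     | some (some a, some b, some c, some d, some e) => (some a, some b, some c, some d, some e)
     | _ => ((none : Option String), (none : Option String), (none : Option String),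
        (none : Option String), (none : Option String)))
      = (match pvLoopB ws pvFieldsB with
         | none => (none, none, none, none, none)
         | some out =>
           match out with
           | [a, b, c, d, e] => (some a, some b, some c, some d, some e)
           | _ => (none, none, none, none, none)) := by
  rw [pv_charA, pv_any_split]
  simp only [pvLoopB, pvFieldsB, pv_fieldB_char]
  generalize ws.any (fun w => PySem.Str.startswith w "id=" && (pvQuoted w).isNone) = a1
  generalize ws.any (fun w => PySem.Str.startswith w "provinsi=" && (pvQuoted w).isNone) = a2
  generalize ws.any (fun w => PySem.Str.startswith w "klasifikasi=\"" && (pvQuoted w).isNone) = a3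
  generalize ws.any (fun w => PySem.Str.startswith w "sub_klasifikasi=\"" && (pvQuoted w).isNone) = a4
  generalize ws.any (fun w => PySem.Str.startswith w "lembaga_peradilan=\"" && (pvQuoted w).isNone) = a5
  generalize pvComp "id=" 40 none ws = g1
  generalize pvComp "provinsi=" 15 none ws = g2
  generalize pvComp "klasifikasi=\"" 15 none ws = g3
  generalize pvComp "sub_klasifikasi=\"" 30 none ws = g4
  generalize pvComp "lembaga_peradilan=\"" 20 none ws = g5
  cases a1 <;> cases a2 <;> cases a3 <;> cases a4 <;> cases a5 <;>
    cases g1 <;> cases g2 <;> cases g3 <;> cases g4 <;> cases g5 <;> rfl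

-- ===== VERDICT (by name: the statement is the Claim_ definition above) =====
theorem extract_attributes_content_spec : Claim_equal_extract_attributes_content := by
  intro lines _
  unfold Spec_extract_attributes_content extract_attributes_content extract_attributes_content_alt
  rw [pv_lines_to_words]
  exact pv_main_ws _
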